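-- pv_equiv track=rewrite | github.com/hencockable/deep-head-pose | code/my_scripts/run_pretrained_clfs_on_face_tracks.py | collapse_list
-- ===== SOURCE A (Python) =====
-- def collapse_list(lst):
--     out = []
--
--     current_label = lst[0]
--     current_len = 1
--     for j in range(len(lst)):
--         try:
--             if lst[j] == lst[j + 1]:
--                 current_len += 1
--             else:
--                 out.append((current_label, current_len))
--                 current_label = lst[j + 1]
--                 current_len = 1
--         except IndexError:
--             out.append((current_label, current_len))
--
--     return out
-- ===== SOURCE B (Python) =====
-- def collapse_list(lst):
--     boundaries = [i for i in range(len(lst) - 1) if lst[i] != lst[i + 1]]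
--     boundaries.append(len(lst) - 1)
--     out = []
--     prev = -1
--     for b in boundaries:
--         out.append((lst[b], b - prev))
--         prev = b
--     return out
-- ===== Notes on version B (the rewrite author's own statement) =====
-- stated objective: alternative
-- what changed: Replaced the single look-ahead loop with try/except by two passes: first build the list of change-point indices, then emit (value, run_length) pairs as differences of consecutive boundaries.
import Mathlib
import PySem

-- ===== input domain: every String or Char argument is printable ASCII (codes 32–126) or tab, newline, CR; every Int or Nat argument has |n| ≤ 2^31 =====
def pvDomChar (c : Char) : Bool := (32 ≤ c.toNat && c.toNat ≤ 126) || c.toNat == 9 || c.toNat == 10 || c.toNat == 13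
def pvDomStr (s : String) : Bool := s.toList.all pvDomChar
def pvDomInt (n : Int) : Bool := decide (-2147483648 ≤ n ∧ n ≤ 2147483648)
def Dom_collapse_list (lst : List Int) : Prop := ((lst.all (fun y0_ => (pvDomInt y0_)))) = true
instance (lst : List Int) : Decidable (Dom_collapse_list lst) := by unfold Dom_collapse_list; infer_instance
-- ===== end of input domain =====

-- B replaces A's single look-ahead loop (with its try/except end handling) by two passes:
-- collect change-point indices, then emit (value, run length) as differences of consecutive boundaries.
-- Objective: alternative (same cost, different decomposition).

-- ===== PORT A =====
-- one iteration of A's for-loop body (try: compare lst[j] with lst[j+1]; except IndexError: flush)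
def collapseStepA (lst : List Int) (st : List (Int × Int) × Int × Int) (j : Int) :
    List (Int × Int) × Int × Int :=
  match PySem.List.pyGet? lst (j + 1) with
  | some nxt =>
      if PySem.List.pyGetD lst j 0 = nxt then (st.1, st.2.1, st.2.2 + 1)
      else (st.1 ++ [(st.2.1, st.2.2)], nxt, 1)
  | none => (st.1 ++ [(st.2.1, st.2.2)], st.2.1, st.2.2)

def collapse_list (lst : List Int) : List (Int × Int) :=
  match PySem.List.pyGet? lst 0 with
  | none => []   -- lst[0] raises IndexError in Python; excluded by Pre_
  | some l0 =>
      ((PySem.List.pyRange 0 (lst.length : Int) 1).foldl (collapseStepA lst) ([], l0, 1)).1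

-- ===== PORT B =====
-- one iteration of B's for-loop over boundaries
def collapseStepB (lst : List Int) (st : List (Int × Int) × Int) (b : Int) :
    List (Int × Int) × Int :=
  (st.1 ++ [(PySem.List.pyGetD lst b 0, b - st.2)], b)

def collapse_list_alt (lst : List Int) : List (Int × Int) :=
  let boundaries :=
    ((PySem.List.pyRange 0 ((lst.length : Int) - 1) 1).filter
      (fun i => PySem.List.pyGetD lst i 0 != PySem.List.pyGetD lst (i + 1) 0))
      ++ [(lst.length : Int) - 1]
  (boundaries.foldl (collapseStepB lst) (([] : List (Int × Int)), (-1 : Int))).1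

-- ===== PRECONDITION & SPEC =====
-- Pre_ excludes exactly the empty list, on which A (lst[0]) raises IndexError (B raises there too).
def Pre_collapse_list (lst : List Int) : Prop := lst ≠ []
instance (lst : List Int) : Decidable (Pre_collapse_list lst) := by
  unfold Pre_collapse_list; infer_instance
def pvWitness_collapse_list : List Int := [1, 1, 2]
def Spec_collapse_list (lst : List Int) (out : List (Int × Int)) : Prop := out = collapse_list_alt lst
instance (lst : List Int) (out : List (Int × Int)) : Decidable (Spec_collapse_list lst out) := by
  unfold Spec_collapse_list; infer_instance

-- ===== CLAIM (what is proved, stated in full; the proofs are below) =====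
def Claim_equal_collapse_list : Prop :=
  ∀ (lst : List Int), Dom_collapse_list lst → Pre_collapse_list lst →
    Spec_collapse_list lst (collapse_list lst)

-- ===== LEMMAS AND PROOFS =====

-- canonical run-length encoding of (current label, current length, rest)
def rleAux (label len : Int) : List Int → List (Int × Int)
  | [] => [(label, len)]
  | x :: xs => if x = label then rleAux label (len + 1) xs else (label, len) :: rleAux x 1 xs

lemma lemA (lst : List Int) :
    ∀ (m k : Nat), m = lst.length - k → k < lst.length → ∀ (out : List (Int × Int)) (len : Int),
      ((PySem.List.pyRange (k : Int) (lst.length : Int) 1).foldl (collapseStepA lst)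
        (out, lst.getD k 0, len)).1
      = out ++ rleAux (lst.getD k 0) len (lst.drop (k + 1)) := by
  intro m
  induction m with
  | zero => intro k hm hk; omega
  | succ m ih =>
    intro k hm hk out len
    have hkI : (k : Int) < (lst.length : Int) := by exact_mod_cast hk
    rw [PySem.List.pyRange_one_cons hkI]
    rw [List.foldl_cons]
    by_cases hend : k + 1 = lst.length
    · -- last index: lst[k+1] raises → except branch appends
      have h1 : PySem.List.pyGet? lst ((k : Int) + 1) = none := by
        have : ((k : Int) + 1) = ((k + 1 : Nat) : Int) := by push_cast; ring
        rw [this, PySem.List.pyGet?_natCast]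
        simp [hend]
      have h2 : PySem.List.pyRange ((k : Int) + 1) (lst.length : Int) 1 = [] := by
        apply PySem.List.pyRange_one_eq_nil; omega
      simp only [collapseStepA, h1, h2, List.foldl_nil]
      have hdrop : lst.drop (k + 1) = [] := by
        apply List.drop_eq_nil_of_le; omega
      simp [rleAux, hdrop]
    · have hk1 : k + 1 < lst.length := by omega
      have h1 : PySem.List.pyGet? lst ((k : Int) + 1) = some lst[k + 1] := by
        have : ((k : Int) + 1) = ((k + 1 : Nat) : Int) := by push_cast; ring
        rw [this, PySem.List.pyGet?_natCast]
        simp [hk1]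
      have hgk : PySem.List.pyGetD lst (k : Int) 0 = lst.getD k 0 := by
        simp
      have hdrop : lst.drop (k + 1) = lst[k + 1] :: lst.drop (k + 2) := by
        rw [List.drop_eq_getElem_cons hk1]
      have hgD : lst.getD (k + 1) 0 = lst[k + 1] := by
        simp [List.getD, hk1]
      have hcast : (k : Int) + 1 = ((k + 1 : Nat) : Int) := by push_cast; ring
      by_cases heq : lst.getD k 0 = lst[k + 1]
      · -- same value: run continues
        simp only [collapseStepA, h1, hgk, heq, reduceIte]
        rw [hcast]
        have := ih (k + 1) (by omega) hk1 out (len + 1)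
        rw [hgD] at this
        rw [this, hdrop, rleAux]
        simp
      · -- boundary: flush current run
        simp only [collapseStepA, h1, hgk, if_neg heq]
        rw [hcast]
        have := ih (k + 1) (by omega) hk1 (out ++ [(lst.getD k 0, len)]) 1
        rw [hgD] at this
        rw [this, hdrop, rleAux]
        rw [if_neg (fun h => heq h.symm)]
        simp

lemma lemB (lst : List Int) :
    ∀ (m k : Nat), m = lst.length - k → k < lst.length → ∀ (out : List (Int × Int)) (prev : Int),
      ((((PySem.List.pyRange (k : Int) ((lst.length : Int) - 1) 1).filter
          (fun i => PySem.List.pyGetD lst i 0 != PySem.List.pyGetD lst (i + 1) 0))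
        ++ [(lst.length : Int) - 1]).foldl (collapseStepB lst) (out, prev)).1
      = out ++ rleAux (lst.getD k 0) ((k : Int) - prev) (lst.drop (k + 1)) := by
  intro m
  induction m with
  | zero => intro k hm hk; omega
  | succ m ih =>
    intro k hm hk out prev
    by_cases hend : k + 1 = lst.length
    · -- k is the last index: the range is empty, only the appended final boundary remains
      have h2 : PySem.List.pyRange (k : Int) ((lst.length : Int) - 1) 1 = [] := by
        apply PySem.List.pyRange_one_eq_nil; omega
      have hdrop : lst.drop (k + 1) = [] := by
        apply List.drop_eq_nil_of_le; omega
      have hkI : ((lst.length : Int) - 1) = (k : Int) := by omega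
      simp only [h2, List.filter_nil, List.nil_append]
      simp [collapseStepB, hkI, hdrop, rleAux]
    · have hk1 : k + 1 < lst.length := by omega
      have hkI : (k : Int) < (lst.length : Int) - 1 := by omega
      rw [PySem.List.pyRange_one_cons hkI]
      have hgD : lst.getD (k + 1) 0 = lst[k + 1] := by simp [List.getD, hk1]
      have hdrop : lst.drop (k + 1) = lst[k + 1] :: lst.drop (k + 2) := by
        rw [List.drop_eq_getElem_cons hk1]
      have hcast : (k : Int) + 1 = ((k + 1 : Nat) : Int) := by push_cast; ring
      have hfk : PySem.List.pyGetD lst (k : Int) 0 = lst.getD k 0 := by simp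
      have hfk1 : PySem.List.pyGetD lst ((k : Int) + 1) 0 = lst.getD (k + 1) 0 := by
        rw [hcast, PySem.List.pyGetD_natCast]
      by_cases heq : lst.getD k 0 = lst[k + 1]
      · -- no boundary at k: filter drops it
        have hp : (PySem.List.pyGetD lst (k : Int) 0 != PySem.List.pyGetD lst ((k : Int) + 1) 0)
            = false := by
          rw [hfk, hfk1, hgD, heq]; simp
        rw [List.filter_cons, if_neg (by rw [hp]; simp)]
        rw [hcast]
        have := ih (k + 1) (by omega) hk1 out prev
        rw [hgD] at this
        rw [this, hdrop, rleAux, if_pos heq.symm, heq]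
        have : ((k + 1 : Nat) : Int) - prev = (k : Int) - prev + 1 := by push_cast; ring
        rw [this]
      · -- boundary at k: filter keeps it, B emits the run ending at k
        have hp : (PySem.List.pyGetD lst (k : Int) 0 != PySem.List.pyGetD lst ((k : Int) + 1) 0)
            = true := by
          rw [hfk, hfk1, hgD]; simpa using heq
        rw [List.filter_cons, if_pos hp]
        rw [List.cons_append, List.foldl_cons]
        simp only [collapseStepB, hfk]
        rw [hcast]
        have := ih (k + 1) (by omega) hk1 (out ++ [(lst.getD k 0, (k : Int) - prev)]) ((k : Nat) : Int)
        rw [hgD] at this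
        rw [this, hdrop, rleAux, if_neg (fun h => heq h.symm)]
        have : ((k + 1 : Nat) : Int) - ((k : Nat) : Int) = 1 := by push_cast; ring
        rw [this]
        simp

-- ===== VERDICT (by name: the statement is the Claim_ definition above) =====
theorem collapse_list_spec : Claim_equal_collapse_list := by
  intro lst _ hpre
  unfold Spec_collapse_list
  match lst, hpre with
  | a :: xs, _ =>
    have hlen : 0 < (a :: xs).length := by simp
    unfold collapse_list collapse_list_alt
    rw [PySem.List.pyGet?_zero_cons]
    have hA := lemA (a :: xs) ((a :: xs).length - 0) 0 rfl hlen [] 1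
    have hB := lemB (a :: xs) ((a :: xs).length - 0) 0 rfl hlen [] (-1)
    norm_num [List.getD] at hA hB
    norm_num
    rw [hA, hB]
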